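-- pv_equiv track=rewrite | github.com/lingengyuan/TheAlgorithms-Zig | benchmarks/python_vs_zig/python_bench_all.py | red_black_tree_workload
-- ===== SOURCE A (Python) =====
-- MASK_64 = (1 << 64) - 1
--
-- def signed_i64_to_u64(value: int) -> int:
--     return value & MASK_64
--
-- def checksum_ints(values: list[int]) -> int:
--     if not values:
--         return 0
--     return (
--         signed_i64_to_u64(values[0])
--         + signed_i64_to_u64(values[len(values) // 2])
--         + signed_i64_to_u64(values[-1])
--         + len(values)
--     ) & MASK_64
--
-- def red_black_tree_workload(values: list[int], queries: list[int]) -> int: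
--     seen: set[int] = set()
--     inserted = 0
--     for value in values:
--         if value not in seen:
--             seen.add(value)
--             inserted += 1
--
--     hits = sum(1 for query in queries if query in seen)
--     ordered = sorted(seen)
--     inorder_checksum = checksum_ints(ordered)
--     color_props_ok = 1 if ordered == sorted(ordered) else 0
--
--     return (
--         inserted
--         + (hits * 3)
--         + (inorder_checksum * 5)
--         + (color_props_ok * 7)
--         + (len(seen) * 11)
--     ) & MASK_64
-- ===== SOURCE B (Python) =====
-- MASK_64 = (1 << 64) - 1
--
-- def _kth_smallest(xs, k):
--     # iterative quickselect (middle pivot) on a duplicate-free non-empty list;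
--     # returns the k-th smallest element without sorting
--     while True:
--         pivot = xs[len(xs) // 2]
--         less = [x for x in xs if x < pivot]
--         if k < len(less):
--             xs = less
--         elif k == len(less):
--             return pivot
--         else:
--             k -= len(less) + 1
--             xs = [x for x in xs if x > pivot]
--
-- def red_black_tree_workload(values: list[int], queries: list[int]) -> int:
--     seen = set(values)
--     n = len(seen)
--     hits = sum(q in seen for q in queries)
--     if n == 0:
--         checksum = 0
--     else:
--         pool = list(seen)
--         lo = min(pool)
--         hi = max(pool)
--         mid = _kth_smallest(pool, n // 2)
--         checksum = ((lo & MASK_64) + (mid & MASK_64) + (hi & MASK_64) + n) & MASK_64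
--     return (12 * n + 3 * hits + 5 * checksum + 7) & MASK_64
-- ===== Notes on version B (the rewrite author's own statement) =====
-- stated objective: alternative
-- what changed: B never sorts: it reads min and max off the distinct values by scan and finds the median distinct value with an iterative quickselect (expected linear instead of O(u log u) for the order statistics), folding the identities inserted == len(seen) and color_props_ok == 1 into the final arithmetic (12*n ... + 7); overall runtime is dominated by the O(n+q) dedup/query passes both share.
import Mathlib
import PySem

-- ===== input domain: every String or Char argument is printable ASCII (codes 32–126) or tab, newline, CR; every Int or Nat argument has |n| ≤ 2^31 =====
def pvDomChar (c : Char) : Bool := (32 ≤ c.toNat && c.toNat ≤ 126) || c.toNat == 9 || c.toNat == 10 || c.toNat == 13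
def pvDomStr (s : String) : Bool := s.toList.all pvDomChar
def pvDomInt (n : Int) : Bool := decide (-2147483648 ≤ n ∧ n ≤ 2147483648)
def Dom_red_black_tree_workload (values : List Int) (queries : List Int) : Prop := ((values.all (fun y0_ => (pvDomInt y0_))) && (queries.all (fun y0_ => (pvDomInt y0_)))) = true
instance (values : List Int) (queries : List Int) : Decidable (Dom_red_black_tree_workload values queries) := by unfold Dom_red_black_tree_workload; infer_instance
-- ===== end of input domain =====

-- B computes the three order statistics of the distinct values without ever sorting
-- (min/max by scan, median by iterative quickselect) and folds the identities
-- inserted == len(seen) and color_props_ok == 1 into the final arithmetic.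


-- ===== PORT A =====
def MASK_64 : Int := 18446744073709551615

def signed_i64_to_u64 (value : Int) : Int := PySem.Int.band value MASK_64

-- indices 0, len//2, -1 are always in range on the non-empty branch, so pyGetD's default 0 is unreachable
def checksum_ints (values : List Int) : Int :=
  if values = [] then 0
  else
    PySem.Int.band
      (signed_i64_to_u64 (PySem.List.pyGetD values 0 0)
        + signed_i64_to_u64 (PySem.List.pyGetD values (PySem.Int.floordiv (values.length : Int) 2) 0)
        + signed_i64_to_u64 (PySem.List.pyGetD values (-1) 0)
        + (values.length : Int))
      MASK_64

def red_black_tree_workload (values : List Int) (queries : List Int) : Int :=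
  let st := values.foldl
    (fun (p : PySem.Set Int × Int) value =>
      if ¬ (PySem.Set.contains p.1 value = true) then (PySem.Set.add p.1 value, p.2 + 1) else p)
    (PySem.Set.empty, 0)
  let seen := st.1
  let inserted := st.2
  let hits : Int := queries.foldl (fun acc query => if PySem.Set.contains seen query = true then acc + 1 else acc) 0
  let ordered := PySem.List.sorted seen (fun x => x) false
  let inorder_checksum := checksum_ints ordered
  let color_props_ok : Int := if ordered = PySem.List.sorted ordered (fun x => x) false then 1 else 0
  PySem.Int.band
    (inserted + hits * 3 + inorder_checksum * 5 + color_props_ok * 7 + (seen.length : Int) * 11)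
    MASK_64

-- ===== PORT B =====
-- iterative quickselect (middle pivot) of Source B, as the equivalent recursion on the shrinking
-- list; the fuel argument only makes the recursion structural (each step strictly shortens the
-- list, so fuel = length never runs out — see kth_go_eq_sorted), and the [] branch is
-- unreachable from red_black_tree_workload_alt (the pool is non-empty there)
def kth_go : Nat → List Int → Int → Int
  | 0, _, _ => 0
  | fuel + 1, xs, k =>
    if xs = [] then 0
    else
      let p := PySem.List.pyGetD xs (PySem.Int.floordiv ((xs.length : Int)) 2) 0
      let less := xs.filter (fun x => decide (x < p))
      if k < (less.length : Int) then kth_go fuel less k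
      else if k = (less.length : Int) then p
      else kth_go fuel (xs.filter (fun x => decide (p < x))) (k - (less.length : Int) - 1)

def kth_smallest (xs : List Int) (k : Int) : Int := kth_go xs.length xs k

def red_black_tree_workload_alt (values : List Int) (queries : List Int) : Int :=
  let seen := PySem.Set.ofList values
  let n : Int := (seen.length : Int)
  let hits : Int := (queries.countP (fun q => PySem.Set.contains seen q) : Int)
  let checksum : Int :=
    if n = 0 then 0
    else
      -- seen is non-empty here, so min?/max? are some and getD's default 0 is unreachable
      let lo := (PySem.List.min? seen (fun x => x)).getD 0
      let hi := (PySem.List.max? seen (fun x => x)).getD 0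
      let mid := kth_smallest seen (PySem.Int.floordiv n 2)
      PySem.Int.band
        (PySem.Int.band lo MASK_64 + PySem.Int.band mid MASK_64 + PySem.Int.band hi MASK_64 + n)
        MASK_64
  PySem.Int.band (12 * n + 3 * hits + 5 * checksum + 7) MASK_64

-- ===== PRECONDITION & SPEC =====
def Spec_red_black_tree_workload (values : List Int) (queries : List Int) (out : Int) : Prop := out = red_black_tree_workload_alt values queries
instance (values : List Int) (queries : List Int) (out : Int) : Decidable (Spec_red_black_tree_workload values queries out) := by unfold Spec_red_black_tree_workload; infer_instance

-- ===== CLAIM (what is proved, stated in full; the proofs are below) =====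
def Claim_equal_red_black_tree_workload : Prop := ∀ (values : List Int) (queries : List Int), Dom_red_black_tree_workload values queries → Spec_red_black_tree_workload values queries (red_black_tree_workload values queries)

-- ===== LEMMAS AND PROOFS =====

-- A's dedup loop: the running pair is (set so far, its size)
lemma aLoop_eq (l : List Int) (s : PySem.Set Int) :
    l.foldl (fun (p : PySem.Set Int × Int) value =>
        if ¬ (PySem.Set.contains p.1 value = true) then (PySem.Set.add p.1 value, p.2 + 1) else p)
      (s, (s.length : Int))
    = (l.foldl PySem.Set.add s, ((l.foldl PySem.Set.add s).length : Int)) := by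
  induction l generalizing s with
  | nil => rfl
  | cons v t ih =>
    simp only [List.foldl_cons]
    by_cases h : PySem.Set.contains s v = true
    · have hadd : PySem.Set.add s v = s := PySem.Set.add_of_mem ((PySem.Set.contains_iff s v).mp h)
      simp only [h, not_true_eq_false, if_false]
      rw [hadd]
      exact ih s
    · have hmem : v ∉ s := fun hm => h ((PySem.Set.contains_iff s v).mpr hm)
      have hlen : ((PySem.Set.add s v).length : Int) = (s.length : Int) + 1 := by
        rw [PySem.Set.add_of_not_mem hmem]; simp
      simp only [h]
      rw [← hlen]
      exact ih (PySem.Set.add s v)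

-- every element of a Pairwise (≤) list is ≤ its last element
lemma le_getLast?_of_pairwise_le : ∀ (acc : List Int), acc.Pairwise (· ≤ ·) →
    ∀ la, acc.getLast? = some la → ∀ a ∈ acc, a ≤ la := by
  intro acc
  induction acc with
  | nil => intro _ la hla; simp at hla
  | cons b rest ih =>
    intro hpw la hla a ha
    cases rest with
    | nil => simp at hla ha; omega
    | cons c r =>
      have hla' : (c :: r).getLast? = some la := by
        simpa [List.getLast?_cons_cons] using hla
      have hlamem : la ∈ c :: r := List.mem_of_getLast? hla'
      rcases List.mem_cons.mp ha with rfl | ha'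
      · exact (List.pairwise_cons.mp hpw).1 la hlamem
      · exact ih (List.pairwise_cons.mp hpw).2 la hla' a ha'

-- a sorted permutation of a duplicate-free list is strictly increasing
lemma sorted_pairwise_lt_of_nodup (l : List Int) (hnd : l.Nodup) :
    (PySem.List.sorted l (fun x => x)).Pairwise (· < ·) := by
  have h1 : (PySem.List.sorted l (fun x => x)).Pairwise (· ≤ ·) := by
    simpa using PySem.List.sorted_pairwise (xs := l) (key := fun x => x)
  have h2 : (PySem.List.sorted l (fun x => x)).Nodup :=
    ((PySem.List.sorted_perm l (fun x => x) false).nodup_iff).mpr hnd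
  exact (h1.and h2).imp (fun h => lt_of_le_of_ne h.1 h.2)

-- quickselect returns the k-th element of the sorted order of a duplicate-free list
lemma kth_go_eq_sorted : ∀ (fuel : Nat) (xs : List Int), xs.length ≤ fuel → xs.Nodup →
    ∀ k : Int, 0 ≤ k → k < (xs.length : Int) →
    kth_go fuel xs k = PySem.List.pyGetD (PySem.List.sorted xs (fun x => x)) k 0 := by
  intro fuel
  induction fuel with
  | zero => intro xs hN _ k hk0 hk1; exfalso; omega
  | succ N ih =>
    intro xs hN hnd k hk0 hk1
    have hx : xs ≠ [] := by intro h; subst h; simp at hk1; omega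
    rw [kth_go, if_neg hx]
    simp only []
    set p := PySem.List.pyGetD xs (PySem.Int.floordiv ((xs.length : Int)) 2) 0 with hp
    set less := xs.filter (fun x => decide (x < p)) with hless
    set greater := xs.filter (fun x => decide (p < x)) with hgreater
    have hlenpos : 0 < xs.length := List.length_pos_iff.mpr hx
    have hfd : PySem.Int.floordiv ((xs.length : Int)) 2 = ((xs.length / 2 : Nat) : Int) := by
      exact_mod_cast PySem.Int.floordiv_natCast xs.length 2
    have hpmem : p ∈ xs := PySem.List.pyGetD_mem xs 0
      ⟨by omega, by rw [hfd]; exact_mod_cast Nat.div_lt_self hlenpos (by omega)⟩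
    have hndl : less.Nodup := hnd.filter _
    have hndg : greater.Nodup := hnd.filter _
    have hperm1 : (xs.filter (fun x => !decide (x < p))).Perm (p :: greater) := by
      have hnd1 : (xs.filter (fun x => !decide (x < p))).Nodup := hnd.filter _
      have hnd2 : (p :: greater).Nodup := by
        refine List.nodup_cons.mpr ⟨?_, hndg⟩
        simp [hgreater, List.mem_filter]
      refine (List.perm_ext_iff_of_nodup hnd1 hnd2).mpr ?_
      intro a
      simp only [List.mem_filter, List.mem_cons, hgreater, Bool.not_eq_eq_eq_not,
        Bool.not_true, decide_eq_false_iff_not, decide_eq_true_eq, not_lt]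
      constructor
      · rintro ⟨h1, h2⟩
        rcases eq_or_lt_of_le h2 with h | h
        · exact Or.inl h.symm
        · exact Or.inr ⟨h1, h⟩
      · rintro (rfl | ⟨h1, h2⟩)
        · exact ⟨hpmem, le_refl _⟩
        · exact ⟨h1, le_of_lt h2⟩
    have hperm : (less ++ p :: greater).Perm xs :=
      ((List.Perm.append_left less hperm1.symm).trans (List.filter_append_perm _ xs))
    have hlen : less.length + 1 + greater.length = xs.length := by
      have h := hperm.length_eq
      simp [List.length_append] at h
      omega
    have hlen' : (less.length : Int) + 1 + (greater.length : Int) = (xs.length : Int) := by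
      exact_mod_cast hlen
    have hpl := sorted_pairwise_lt_of_nodup less hndl
    have hpg := sorted_pairwise_lt_of_nodup greater hndg
    have hL : PySem.List.sorted xs (fun x => x)
        = PySem.List.sorted less (fun x => x) ++ p :: PySem.List.sorted greater (fun x => x) := by
      apply PySem.List.sorted_eq_of_perm_of_pairwise_lt
      · exact ((PySem.List.sorted_perm less (fun x => x) false).append
          ((PySem.List.sorted_perm greater (fun x => x) false).cons p)).trans hperm
      · rw [List.pairwise_append]
        refine ⟨hpl, ?_, ?_⟩
        · rw [List.pairwise_cons]
          refine ⟨?_, hpg⟩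
          intro b hb
          have hbg : b ∈ greater := (PySem.List.mem_sorted _ _ _ _).mp hb
          have := (List.mem_filter.mp hbg).2
          simpa using this
        · intro a ha b hb
          have hal : a ∈ less := (PySem.List.mem_sorted _ _ _ _).mp ha
          have halt : a < p := by
            have := (List.mem_filter.mp hal).2; simpa using this
          rcases List.mem_cons.mp hb with rfl | hb'
          · exact halt
          · have hbg : b ∈ greater := (PySem.List.mem_sorted _ _ _ _).mp hb'
            have : p < b := by have := (List.mem_filter.mp hbg).2; simpa using this
            exact lt_trans halt this
    rw [hL]
    by_cases hk : k < (less.length : Int)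
    · rw [if_pos hk]
      have hIH := ih less (by omega) hndl k hk0 hk
      rw [hIH]
      rw [PySem.List.pyGetD_eq_getElem _ 0 hk0
          (by simp [PySem.List.length_sorted]; omega),
        PySem.List.pyGetD_eq_getElem _ 0 hk0 (by simp [PySem.List.length_sorted]; omega)]
      exact (List.getElem_append_left (by simp [PySem.List.length_sorted]; omega)).symm
    · rw [if_neg hk]
      by_cases hk2 : k = (less.length : Int)
      · rw [if_pos hk2]
        rw [PySem.List.pyGetD_eq_getElem _ 0 hk0 (by simp [PySem.List.length_sorted]; omega)]
        rw [List.getElem_append_right (by simp [PySem.List.length_sorted]; omega)]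
        simp only [PySem.List.length_sorted]
        have hidx : k.toNat - less.length = 0 := by omega
        simp [hidx]
      · rw [if_neg hk2]
        have hgb : k - (less.length : Int) - 1 < (greater.length : Int) := by omega
        have hIH := ih greater (by omega) hndg (k - (less.length : Int) - 1) (by omega) hgb
        rw [hIH]
        rw [PySem.List.pyGetD_eq_getElem _ 0 hk0 (by simp [PySem.List.length_sorted]; omega),
          PySem.List.pyGetD_eq_getElem _ 0 (by omega) (by simp [PySem.List.length_sorted]; omega)]
        rw [List.getElem_append_right (by simp [PySem.List.length_sorted]; omega)]
        simp only [PySem.List.length_sorted]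
        have hidx : k.toNat - less.length = (k - (less.length : Int) - 1).toNat + 1 := by omega
        simp only [hidx, List.getElem_cons_succ]

-- ===== VERDICT (by name: the statement is the Claim_ definition above) =====
theorem red_black_tree_workload_spec : Claim_equal_red_black_tree_workload := by
  unfold Claim_equal_red_black_tree_workload
  intro values queries _
  unfold Spec_red_black_tree_workload red_black_tree_workload red_black_tree_workload_alt
  have hfold' : values.foldl
      (fun (p : PySem.Set Int × Int) value =>
        if ¬ (PySem.Set.contains p.1 value = true) then (PySem.Set.add p.1 value, p.2 + 1) else p)
      (PySem.Set.empty, 0)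
      = (PySem.Set.ofList values, ((PySem.Set.ofList values).length : Int)) := by
    simpa [PySem.Set.ofList_eq_foldl] using aLoop_eq values PySem.Set.empty
  simp only [hfold']
  set u := PySem.Set.ofList values with hu
  set ord := PySem.List.sorted u (fun x => x) false with hord
  have hnd : u.Nodup := PySem.Set.nodup_ofList values
  have hhits : queries.foldl
      (fun acc query => if PySem.Set.contains u query = true then acc + 1 else acc) (0 : Int)
      = ((queries.countP (fun q => PySem.Set.contains u q) : Nat) : Int) := by
    rw [PySem.List.foldl_count_if]; exact zero_add _
  have hcolor : (if ord = PySem.List.sorted ord (fun x => x) false then (1 : Int) else 0) = 1 := by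
    rw [hord, PySem.List.sorted_sorted u (fun x => x)]
    exact if_pos rfl
  have hlenord : ord.length = u.length := PySem.List.length_sorted u (fun x => x) false
  rw [hhits, hcolor]
  by_cases hue : u = []
  · have hordnil : ord = [] := by rw [hord, hue]; rfl
    rw [checksum_ints, if_pos hordnil, if_pos (by rw [hue]; rfl)]
    rw [hue]
    simp only [List.length_nil, Nat.cast_zero]
    congr 1
    ring
  · have hne : ord ≠ [] := by
      rw [hord]; intro h
      exact hue ((PySem.List.sorted_eq_nil_iff u (fun x => x) false).mp h)
    obtain ⟨m, t, hmt⟩ : ∃ m t, ord = m :: t := by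
      cases h : ord with
      | nil => exact absurd h hne
      | cons a b => exact ⟨a, b, rfl⟩
    have hulen : 0 < u.length := by
      cases h : u with
      | nil => exact absurd h hue
      | cons a b => simp
    have hn0 : ((u.length : Int)) ≠ 0 := by
      intro h; omega
    rw [checksum_ints, if_neg hne, if_neg hn0]
    -- head = min
    obtain ⟨mn, hmn⟩ : ∃ mn, PySem.List.min? u (fun x => x) = some mn := by
      cases h : PySem.List.min? u (fun x => x) with
      | none => exact absurd ((PySem.List.min?_eq_none_iff u (fun x => x)).mp h) hue
      | some a => exact ⟨a, rfl⟩
    have hmmem : m ∈ u := (PySem.List.mem_sorted _ _ _ _).mp (hmt ▸ List.mem_cons_self)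
    have hmin : PySem.List.pyGetD ord 0 0 = (PySem.List.min? u (fun x => x)).getD 0 := by
      rw [hmt, PySem.List.pyGetD_zero_cons, hmn]
      have h1 : mn ≤ m := PySem.List.min?_isMin hmn m hmmem
      have h2 : m ≤ mn := PySem.List.key_head_sorted_le u (fun x => x) (hord ▸ hmt) mn
        (PySem.List.min?_mem hmn)
      simp only [Option.getD_some]
      omega
    -- last = max
    obtain ⟨mx, hmx⟩ : ∃ mx, PySem.List.max? u (fun x => x) = some mx := by
      cases h : PySem.List.max? u (fun x => x) with
      | none => exact absurd ((PySem.List.max?_eq_none_iff u (fun x => x)).mp h) hue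
      | some a => exact ⟨a, rfl⟩
    have hmax : PySem.List.pyGetD ord (-1) 0 = (PySem.List.max? u (fun x => x)).getD 0 := by
      rw [PySem.List.pyGetD_neg_one ord 0 hne, hmx]
      have hlmem : ord.getLast hne ∈ u := (PySem.List.mem_sorted _ _ _ _).mp (List.getLast_mem hne)
      have h1 : ord.getLast hne ≤ mx := PySem.List.max?_isMax hmx _ hlmem
      have hpw : ord.Pairwise (· ≤ ·) := by
        rw [hord]; simpa using PySem.List.sorted_pairwise (xs := u) (key := fun x => x)
      have h2 : mx ≤ ord.getLast hne :=
        le_getLast?_of_pairwise_le ord hpw _ (List.getLast?_eq_some_getLast hne) mx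
          ((PySem.List.mem_sorted _ _ _ _).mpr (PySem.List.max?_mem hmx))
      simp only [Option.getD_some]
      omega
    -- middle = quickselect
    have hmid : PySem.List.pyGetD ord (PySem.Int.floordiv (ord.length : Int) 2) 0
        = kth_smallest u (PySem.Int.floordiv ((u.length : Int)) 2) := by
      have hfd : PySem.Int.floordiv ((u.length : Int)) 2 = ((u.length / 2 : Nat) : Int) := by
        exact_mod_cast PySem.Int.floordiv_natCast u.length 2
      rw [hlenord, kth_smallest]
      rw [kth_go_eq_sorted u.length u (le_refl _) hnd _ (by rw [hfd]; omega)
        (by rw [hfd]; exact_mod_cast Nat.div_lt_self hulen (by omega))]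
    rw [signed_i64_to_u64, signed_i64_to_u64, signed_i64_to_u64, hmin, hmax, hmid, hlenord]
    congr 1
    ring
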